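-- pv_equiv track=rewrite | github.com/businessfawcett-cloud/quizgenius | llm_client.py | _extract_best_option
-- ===== SOURCE A (Python) =====
-- def _extract_best_option(answer: str, options: list[str]) -> str:
--     """If the LLM returned verbose text, find which option it refers to."""
--     answer_lower = answer.lower().strip()
--     for opt in options:
--         if opt.lower().strip() == answer_lower:
--             return opt
--     for opt in options:
--         if opt.lower().strip() in answer_lower:
--             return opt
--     for opt in options:
--         if answer_lower in opt.lower():
--             return opt
--     return answer
-- ===== SOURCE B (Python) =====
-- def _extract_best_option(answer: str, options: list[str]) -> str:
--     """Single pass over options, recording the first match in each of three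
--     categories, then deciding by priority: exact > option-in-answer > answer-in-option."""
--     answer_lower = answer.lower().strip()
--     exact = contained = reverse = None
--     for opt in options:
--         opt_norm = opt.lower().strip()
--         if exact is None and opt_norm == answer_lower:
--             exact = opt
--         if contained is None and opt_norm in answer_lower:
--             contained = opt
--         if reverse is None and answer_lower in opt.lower():
--             reverse = opt
--     if exact is not None:
--         return exact
--     if contained is not None:
--         return contained
--     if reverse is not None:
--         return reverse
--     return answer
-- ===== Notes on version B (the rewrite author's own statement) =====
-- stated objective: alternative
-- what changed: Replaces A's three sequential scans over options with a single pass that records the first match of each of the three categories (exact, option-in-answer, answer-in-option) and decides by priority afterwards.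
import Mathlib
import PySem

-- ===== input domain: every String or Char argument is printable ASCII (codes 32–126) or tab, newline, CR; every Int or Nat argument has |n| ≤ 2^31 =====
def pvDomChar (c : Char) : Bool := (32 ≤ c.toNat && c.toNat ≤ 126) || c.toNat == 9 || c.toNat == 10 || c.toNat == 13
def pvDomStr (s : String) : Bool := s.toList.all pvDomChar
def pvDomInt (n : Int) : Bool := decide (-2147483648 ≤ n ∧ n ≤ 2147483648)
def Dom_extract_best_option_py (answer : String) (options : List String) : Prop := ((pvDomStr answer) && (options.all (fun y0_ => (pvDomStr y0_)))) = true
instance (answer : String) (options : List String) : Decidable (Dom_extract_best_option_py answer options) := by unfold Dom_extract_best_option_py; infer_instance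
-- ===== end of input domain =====

-- B replaces A's three sequential scans with one pass recording the first match per category, decided by priority afterwards (alternative decomposition, same cost).


-- ===== PORT A =====
-- A: three ordered scans with early return (each 'for … return' is a find?).
def extract_best_option_py (answer : String) (options : List String) : String :=
  let answer_lower := PySem.Str.strip (PySem.Str.lower answer)
  match options.find? (fun opt => PySem.Str.strip (PySem.Str.lower opt) == answer_lower) with
  | some opt => opt
  | none =>
  match options.find? (fun opt => PySem.Str.isIn (PySem.Str.strip (PySem.Str.lower opt)) answer_lower) with
  | some opt => opt
  | none =>
  match options.find? (fun opt => PySem.Str.isIn answer_lower (PySem.Str.lower opt)) with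
  | some opt => opt
  | none => answer

-- ===== PORT B =====
-- B: one fold over options maintaining three first-match slots, filled only when still empty.
def pvStep (answer_lower : String) (s : Option String × Option String × Option String)
    (opt : String) : Option String × Option String × Option String :=
  let opt_norm := PySem.Str.strip (PySem.Str.lower opt)
  ( (if s.1.isNone && (opt_norm == answer_lower) then some opt else s.1),
    (if s.2.1.isNone && PySem.Str.isIn opt_norm answer_lower then some opt else s.2.1),
    (if s.2.2.isNone && PySem.Str.isIn answer_lower (PySem.Str.lower opt) then some opt else s.2.2) )

def extract_best_option_py_alt (answer : String) (options : List String) : String :=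
  let answer_lower := PySem.Str.strip (PySem.Str.lower answer)
  let s := options.foldl (pvStep answer_lower) (none, none, none)
  match s.1 with
  | some opt => opt
  | none =>
  match s.2.1 with
  | some opt => opt
  | none =>
  match s.2.2 with
  | some opt => opt
  | none => answer

-- ===== PRECONDITION & SPEC =====
def Spec_extract_best_option_py (answer : String) (options : List String) (out : String) : Prop := out = extract_best_option_py_alt answer options
instance (answer : String) (options : List String) (out : String) : Decidable (Spec_extract_best_option_py answer options out) := by unfold Spec_extract_best_option_py; infer_instance

-- ===== CLAIM (what is proved, stated in full; the proofs are below) =====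
def Claim_equal_extract_best_option_py : Prop := ∀ (answer : String) (options : List String), Dom_extract_best_option_py answer options → Spec_extract_best_option_py answer options (extract_best_option_py answer options)

-- ===== LEMMAS AND PROOFS =====
-- A slot filled only while empty ends as "previous value, else first element satisfying the predicate".
theorem pvFill {α : Type} (p : α → Bool) (o : α) (t : List α) (x : Option α) :
    (if x.isNone && p o then some o else x).or (t.find? p) = x.or ((o :: t).find? p) := by
  cases x <;> cases h : p o <;> simp [h]

-- The fold fills each slot with the first option satisfying its predicate.
theorem pvStep_foldl_eq (al : String) (options : List String)
    (e c r : Option String) :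
    options.foldl (pvStep al) (e, c, r) =
      ( e.or (options.find? (fun opt => PySem.Str.strip (PySem.Str.lower opt) == al)),
        c.or (options.find? (fun opt => PySem.Str.isIn (PySem.Str.strip (PySem.Str.lower opt)) al)),
        r.or (options.find? (fun opt => PySem.Str.isIn al (PySem.Str.lower opt))) ) := by
  induction options generalizing e c r with
  | nil => simp
  | cons o t ih =>
    simp only [List.foldl_cons, pvStep]
    rw [ih]
    refine Prod.ext ?_ (Prod.ext ?_ ?_)
    · exact pvFill (fun opt => PySem.Str.strip (PySem.Str.lower opt) == al) o t e
    · exact pvFill (fun opt => PySem.Str.isIn (PySem.Str.strip (PySem.Str.lower opt)) al) o t c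
    · exact pvFill (fun opt => PySem.Str.isIn al (PySem.Str.lower opt)) o t r

theorem extract_best_option_py_eq (answer : String) (options : List String) :
    extract_best_option_py answer options = extract_best_option_py_alt answer options := by
  simp only [extract_best_option_py, extract_best_option_py_alt, pvStep_foldl_eq, Option.none_or]

-- ===== VERDICT (by name: the statement is the Claim_ definition above) =====
theorem extract_best_option_py_spec : Claim_equal_extract_best_option_py := by
  intro answer options _
  exact extract_best_option_py_eq answer options
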